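-- pv_equiv track=rewrite | github.com/vog/square1 | solve_shape_square1.py | rotate_half_to_left
-- ===== SOURCE A (Python) =====
-- def split_combined_half(combined):
--     sum_half = 6
--     sum_left = 0
--     for i in range(len(combined)):
--         sum_left += combined[i]
--         if sum_left < sum_half:
--             continue
--         if sum_left == sum_half:
--             return (combined[:i+1], combined[i+1:])
--         return None
--
-- def rotate_half_to_left(half):
--     (hl, hr) = half
--     initial_combined = hl + hr
--     combined = initial_combined
--     while True:
--         combined = combined[1:] + (combined[0],)
--         if combined == initial_combined:
--             return half
--         split_result = split_combined_half(combined)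
--         if split_result is not None:
--             return split_result
-- ===== SOURCE B (Python) =====
-- def rotate_half_to_left(half):
--     # Prefix-sum re-implementation: build doubled sequence + prefix sums once,
--     # find the rotation period p, then test offsets 1..p-1 arithmetically.
--     (hl, hr) = half
--     combined = hl + hr
--     n = len(combined)
--     doubled = combined + combined
--     prefix = [0]
--     s = 0
--     for x in doubled:
--         s += x
--         prefix.append(s)
--     p = n
--     for k in range(1, n):
--         if doubled[k:k + n] == combined:
--             p = k
--             break
--     for k in range(1, p):
--         base = prefix[k]
--         i = 1
--         while i <= n:
--             v = prefix[k + i] - base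
--             if v >= 6:
--                 if v == 6:
--                     return (doubled[k:k + i], doubled[k + i:k + n])
--                 break
--             i += 1
--     return half
-- ===== Notes on version B (the rewrite author's own statement) =====
-- stated objective: alternative
-- what changed: Instead of materialising each rotation and rescanning it, B builds the doubled sequence and its prefix-sum array once, finds the rotation period first, and then tests each offset 1..p-1 purely by prefix-sum arithmetic, returning slices of the doubled sequence.
-- outside the precondition, e.g. on rotate_half_to_left(((), ())): A raises IndexError, B returns ((), ())
import Mathlib
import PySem

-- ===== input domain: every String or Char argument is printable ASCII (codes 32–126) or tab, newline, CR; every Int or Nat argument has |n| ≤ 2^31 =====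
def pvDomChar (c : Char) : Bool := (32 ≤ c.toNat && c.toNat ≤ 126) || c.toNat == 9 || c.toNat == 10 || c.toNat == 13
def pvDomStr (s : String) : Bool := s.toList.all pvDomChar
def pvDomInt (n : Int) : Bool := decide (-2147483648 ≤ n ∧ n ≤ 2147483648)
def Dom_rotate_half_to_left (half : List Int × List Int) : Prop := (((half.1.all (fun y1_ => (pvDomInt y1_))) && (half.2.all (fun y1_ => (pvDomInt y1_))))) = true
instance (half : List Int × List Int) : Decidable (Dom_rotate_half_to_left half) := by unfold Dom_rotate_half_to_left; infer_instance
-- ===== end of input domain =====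

-- B replaces A's materialise-and-rescan-every-rotation loop by one doubled sequence with a
-- prefix-sum array: the rotation period is found first, then each offset is tested by
-- prefix-sum arithmetic (objective: alternative decomposition, same asymptotic cost).

-- ===== PORT A =====
-- for i in range(len(combined)): sum_left += combined[i]; …
def pvSplitAuxA (combined : List Int) (i : Nat) (sum_left : Int) : Option (List Int × List Int) :=
  if h : i < combined.length then
    let s' := sum_left + combined[i]
    if s' < 6 then pvSplitAuxA combined (i + 1) s'
    else if s' = 6 then
      some (PySem.List.slice combined none (some ((i : Int) + 1)),
            PySem.List.slice combined (some ((i : Int) + 1)) none)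
    else none
  else none
termination_by combined.length - i

def pvSplitCombinedHalf (combined : List Int) : Option (List Int × List Int) :=
  pvSplitAuxA combined 0 0

-- the 'while True' loop; it returns after at most len(combined) rotations, so that bound
-- (passed as the last, fuel, argument) makes the recursion structural
def pvRotLoopA (initial : List Int) (combined : List Int) (half : List Int × List Int) : Nat → List Int × List Int
  | 0 => half
  | fuel + 1 =>
    match PySem.List.pyGet? combined 0 with
    | none => half
    | some c0 =>
      let combined' := PySem.List.slice combined (some 1) none ++ [c0]
      if combined' = initial then half
      else match pvSplitCombinedHalf combined' with
        | some r => r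
        | none => pvRotLoopA initial combined' half fuel

def rotate_half_to_left (half : List Int × List Int) : List Int × List Int :=
  let initial_combined := half.1 ++ half.2
  pvRotLoopA initial_combined initial_combined half initial_combined.length

-- ===== PORT B =====
-- prefix = [0]; s = 0; for x in doubled: s += x; prefix.append(s)
def pvPrefAux : List Int → List Int → Int → List Int
  | [], pref, _ => pref
  | x :: xs, pref, s => pvPrefAux xs (pref ++ [s + x]) (s + x)

-- p = n; for k in range(1, n): if doubled[k:k+n] == combined: p = k; break
def pvPeriodB (d c : List Int) (n k : Nat) : Nat :=
  if h : k < n then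
    if PySem.List.slice d (some (k : Int)) (some ((k + n : Nat) : Int)) = c then k
    else pvPeriodB d c n (k + 1)
  else n
termination_by n - k

-- i = 1; while i <= n: v = prefix[k+i] - base; …
def pvScanB (pref : List Int) (base : Int) (k n : Nat) (d : List Int) (i : Nat) : Option (List Int × List Int) :=
  if i ≤ n then
    let v := PySem.List.pyGetD pref ((k + i : Nat) : Int) 0 - base
    if 6 ≤ v then
      if v = 6 then
        some (PySem.List.slice d (some (k : Int)) (some ((k + i : Nat) : Int)),
              PySem.List.slice d (some ((k + i : Nat) : Int)) (some ((k + n : Nat) : Int)))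
      else none
    else pvScanB pref base k n d (i + 1)
  else none
termination_by n + 1 - i

-- for k in range(1, p): …
def pvOuterB (pref d : List Int) (n p : Nat) (half : List Int × List Int) (k : Nat) : List Int × List Int :=
  if _h : k < p then
    match pvScanB pref (PySem.List.pyGetD pref (k : Int) 0) k n d 1 with
    | some r => r
    | none => pvOuterB pref d n p half (k + 1)
  else half
termination_by p - k

def rotate_half_to_left_alt (half : List Int × List Int) : List Int × List Int :=
  let combined := half.1 ++ half.2
  let n := combined.length
  let d := combined ++ combined
  let pref := pvPrefAux d [0] 0
  let p := pvPeriodB d combined n 1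
  pvOuterB pref d n p half 1

-- ===== PRECONDITION & SPEC =====
-- Pre_ excludes only the empty input ([], []), on which A raises IndexError (combined[0]).
def Pre_rotate_half_to_left (half : List Int × List Int) : Prop := half.1 ++ half.2 ≠ []
instance (half : List Int × List Int) : Decidable (Pre_rotate_half_to_left half) := by unfold Pre_rotate_half_to_left; infer_instance
def pvWitness_rotate_half_to_left : (List Int × List Int) := ([1, 2, 3], [3, 2, 1])

def Spec_rotate_half_to_left (half : List Int × List Int) (out : List Int × List Int) : Prop := out = rotate_half_to_left_alt half
instance (half : List Int × List Int) (out : List Int × List Int) : Decidable (Spec_rotate_half_to_left half out) := by unfold Spec_rotate_half_to_left; infer_instance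

-- ===== CLAIM (what is proved, stated in full; the proofs are below) =====
def Claim_equal_rotate_half_to_left : Prop := ∀ (half : List Int × List Int), Dom_rotate_half_to_left half → Pre_rotate_half_to_left half → Spec_rotate_half_to_left half (rotate_half_to_left half)

-- ===== LEMMAS AND PROOFS =====

-- the left rotation of c by j positions; pvRot c k is the list A's loop holds after k iterations
def pvRot (c : List Int) (j : Nat) : List Int := c.drop j ++ c.take j

lemma pvRot_length (c : List Int) (j : Nat) (hj : j ≤ c.length) : (pvRot c j).length = c.length := by
  simp [pvRot]; omega

lemma pvPrefAux_eq (xs : List Int) : ∀ (pref : List Int) (s : Int),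
    pvPrefAux xs pref s = pref ++ (List.range xs.length).map (fun j => s + (xs.take (j + 1)).sum) := by
  induction xs with
  | nil => intro pref s; simp [pvPrefAux]
  | cons x xs ih =>
    intro pref s
    rw [pvPrefAux, ih]
    simp [List.range_succ_eq_map, List.map_map, Function.comp_def, List.append_assoc,
      List.take_succ_cons]
    intro a _; ring

lemma pvPref_get (d : List Int) (m : Nat) (hm : m ≤ d.length) :
    PySem.List.pyGetD (pvPrefAux d [0] 0) (m : Int) 0 = (d.take m).sum := by
  rw [PySem.List.pyGetD_natCast, pvPrefAux_eq]
  cases m with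
  | zero => simp
  | succ m =>
    have hm' : m < d.length := by omega
    simp [List.getD, hm']

lemma pvDropD (c : List Int) (k : Nat) (hk : k ≤ c.length) :
    (c ++ c).drop k = pvRot c k ++ c.drop k := by
  rw [List.drop_append_of_le_length hk, pvRot, List.append_assoc, List.take_append_drop]

lemma pvSlice1 (c : List Int) (k i : Nat) (hk : k ≤ c.length) (hi : i ≤ c.length) :
    PySem.List.slice (c ++ c) (some (k : Int)) (some ((k + i : Nat) : Int)) = (pvRot c k).take i := by
  have : ((k + i : Nat) : Int) = ((k : Nat) : Int) + ((i : Nat) : Int) := by push_cast; ring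
  rw [this, PySem.List.slice_natCast_add, pvDropD c k hk,
    List.take_append_of_le_length (by rw [pvRot_length c k hk]; exact hi)]

lemma pvSlice2 (c : List Int) (k i : Nat) (hk : k ≤ c.length) (hi : i ≤ c.length) :
    PySem.List.slice (c ++ c) (some ((k + i : Nat) : Int)) (some ((k + c.length : Nat) : Int)) = (pvRot c k).drop i := by
  have h1 : ((k + c.length : Nat) : Int) = ((k + i : Nat) : Int) + ((c.length - i : Nat) : Int) := by
    push_cast [hi]; omega
  rw [h1, PySem.List.slice_natCast_add]
  rw [← List.drop_drop, pvDropD c k hk,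
    List.drop_append_of_le_length (by rw [pvRot_length c k hk]; exact hi)]
  rw [List.take_append_of_le_length (by simp [pvRot]; omega)]
  apply List.take_of_length_le
  simp [pvRot]; omega

lemma pvTakeD (c : List Int) (k i : Nat) (hk : k ≤ c.length) (hi : i ≤ c.length) :
    (c ++ c).take (k + i) = (c ++ c).take k ++ (pvRot c k).take i := by
  rw [List.take_add]
  congr 1
  rw [pvDropD c k hk]
  exact List.take_append_of_le_length (by rw [pvRot_length c k hk]; exact hi)

lemma pvSumTake (c : List Int) (k i : Nat) (hk : k ≤ c.length) (hi : i ≤ c.length) :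
    ((c ++ c).take (k + i)).sum = ((c ++ c).take k).sum + ((pvRot c k).take i).sum := by
  rw [pvTakeD c k i hk hi, List.sum_append]

lemma pvSplit_eq (c : List Int) (k : Nat) (hk : k < c.length) : ∀ (m i : Nat), c.length - i ≤ m → i ≤ c.length →
    pvSplitAuxA (pvRot c k) i (((pvRot c k).take i).sum)
      = pvScanB (pvPrefAux (c ++ c) [0] 0) (PySem.List.pyGetD (pvPrefAux (c ++ c) [0] 0) (k : Int) 0) k c.length (c ++ c) (i + 1) := by
  have hk' : k ≤ c.length := le_of_lt hk
  have hrl : (pvRot c k).length = c.length := pvRot_length c k hk'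
  intro m
  induction m with
  | zero =>
    intro i h1 h2
    have hi : i = c.length := by omega
    rw [pvSplitAuxA, pvScanB]
    simp [hrl, hi]
  | succ m ih =>
    intro i h1 h2
    by_cases hi : i < c.length
    · have hle : i + 1 ≤ c.length := hi
      have hilt : i < (pvRot c k).length := by omega
      have hs' : ((pvRot c k).take i).sum + (pvRot c k)[i] = ((pvRot c k).take (i + 1)).sum := by
        rw [List.sum_take_succ (pvRot c k) i hilt]
      have hv : PySem.List.pyGetD (pvPrefAux (c ++ c) [0] 0) ((k + (i + 1) : Nat) : Int) 0
          - PySem.List.pyGetD (pvPrefAux (c ++ c) [0] 0) (k : Int) 0 = ((pvRot c k).take (i + 1)).sum := by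
        rw [pvPref_get (c ++ c) (k + (i + 1)) (by simp; omega),
            pvPref_get (c ++ c) k (by simp; omega),
            pvSumTake c k (i + 1) hk' hle]
        ring
      rw [pvSplitAuxA, pvScanB]
      simp only [dif_pos hilt, if_pos hle, hv, hs']
      rcases lt_trichotomy ((pvRot c k).take (i + 1)).sum 6 with h6 | h6 | h6
      · rw [if_pos h6, if_neg (show ¬(6:Int) ≤ ((pvRot c k).take (i + 1)).sum by omega)]
        exact ih (i + 1) (by omega) hle
      · have hlt' : ¬((pvRot c k).take (i + 1)).sum < 6 := by omega
        have hge : (6:Int) ≤ ((pvRot c k).take (i + 1)).sum := by omega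
        rw [if_neg hlt', if_pos hge, if_pos h6, if_pos h6]
        have hcast : ((i : Int) + 1) = ((i + 1 : Nat) : Int) := by push_cast; ring
        rw [hcast, PySem.List.slice_to_natCast, PySem.List.slice_from_natCast,
            pvSlice1 c k (i + 1) hk' hle, pvSlice2 c k (i + 1) hk' hle]
      · have hlt' : ¬((pvRot c k).take (i + 1)).sum < 6 := by omega
        have hge : (6:Int) ≤ ((pvRot c k).take (i + 1)).sum := by omega
        have hne : ¬((pvRot c k).take (i + 1)).sum = 6 := by omega
        rw [if_neg hlt', if_pos hge, if_neg hne, if_neg hne]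
    · have hi' : i = c.length := by omega
      rw [pvSplitAuxA, pvScanB]
      simp [hrl, hi']

lemma pvRot_full (c : List Int) : pvRot c c.length = c := by
  simp [pvRot]

lemma pvPeriod_spec (c : List Int) : ∀ (m k : Nat), c.length - k ≤ m → 1 ≤ k → k ≤ c.length →
    k ≤ pvPeriodB (c ++ c) c c.length k ∧ pvPeriodB (c ++ c) c c.length k ≤ c.length ∧
    pvRot c (pvPeriodB (c ++ c) c c.length k) = c ∧
    (∀ j, k ≤ j → j < pvPeriodB (c ++ c) c c.length k → pvRot c j ≠ c) := by
  intro m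
  induction m with
  | zero =>
    intro k h1 h2 h3
    have hk : k = c.length := by omega
    rw [pvPeriodB, dif_neg (by omega)]
    exact ⟨h3, le_refl _, pvRot_full c, by omega⟩
  | succ m ih =>
    intro k h1 h2 h3
    by_cases hk : k < c.length
    · rw [pvPeriodB, dif_pos hk]
      rw [pvSlice1 c k c.length (le_of_lt hk) (le_refl _),
          List.take_of_length_le (by rw [pvRot_length c k (le_of_lt hk)])]
      by_cases hr : pvRot c k = c
      · rw [if_pos hr]
        exact ⟨le_refl _, le_of_lt hk, hr, by omega⟩
      · rw [if_neg hr]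
        obtain ⟨a, b, c', d⟩ := ih (k + 1) (by omega) (by omega) hk
        refine ⟨by omega, b, c', ?_⟩
        intro j hj1 hj2
        by_cases hjk : j = k
        · rw [hjk]; exact hr
        · exact d j (by omega) hj2
    · have hk' : k = c.length := by omega
      rw [pvPeriodB, dif_neg (by omega)]
      exact ⟨h3, le_refl _, pvRot_full c, by omega⟩

lemma pvRot_step (c : List Int) (j : Nat) (hj : j < c.length) (x : Int) (xs : List Int)
    (h : pvRot c j = x :: xs) : xs ++ [x] = pvRot c (j + 1) := by
  rw [pvRot, List.drop_eq_getElem_cons hj] at h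
  obtain ⟨hx, hxs⟩ := List.cons.inj h
  rw [← hxs, ← hx, pvRot, List.take_add_one, List.getElem?_eq_getElem hj]
  simp

lemma pvStepEq (c : List Int) (half : List Int × List Int) (k : Nat) (h1 : 1 ≤ k) (h2 : k ≤ c.length) :
    pvRotLoopA c (pvRot c (k - 1)) half ((c.length - k) + 1)
      = (if pvRot c k = c then half
         else match pvSplitCombinedHalf (pvRot c k) with
           | some r => r
           | none => pvRotLoopA c (pvRot c k) half (c.length - k)) := by
  have hlen : (pvRot c (k - 1)).length = c.length := pvRot_length c (k - 1) (by omega)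
  have hne : pvRot c (k - 1) ≠ [] := by
    intro h; rw [h] at hlen; simp at hlen; omega
  obtain ⟨x, xs, hx⟩ := List.exists_cons_of_ne_nil hne
  have hstep : xs ++ [x] = pvRot c k := by
    have := pvRot_step c (k - 1) (by omega) x xs hx
    rwa [show k - 1 + 1 = k by omega] at this
  rw [pvRotLoopA, hx]
  simp only [PySem.List.pyGet?_zero_cons, PySem.List.slice_from_one, List.tail_cons, hstep]

lemma pvMain (c : List Int) (half : List Int × List Int) (hn : c ≠ []) : ∀ (m k : Nat),
    pvPeriodB (c ++ c) c c.length 1 - k ≤ m → 1 ≤ k → k ≤ pvPeriodB (c ++ c) c c.length 1 →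
    pvRotLoopA c (pvRot c (k - 1)) half (c.length + 1 - k)
      = pvOuterB (pvPrefAux (c ++ c) [0] 0) (c ++ c) c.length (pvPeriodB (c ++ c) c c.length 1) half k := by
  have hnlen : 1 ≤ c.length := List.length_pos_of_ne_nil hn
  obtain ⟨hp1, hp2, hp3, hp4⟩ := pvPeriod_spec c c.length 1 (by omega) (le_refl _) hnlen
  intro m
  induction m generalizing half with
  | zero =>
    intro k h1 h2 h3
    have hk : k = pvPeriodB (c ++ c) c c.length 1 := by omega
    rw [show c.length + 1 - k = (c.length - k) + 1 by omega, pvStepEq c half k h2 (by omega)]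
    rw [hk, if_pos hp3, pvOuterB, dif_neg (lt_irrefl _)]
  | succ m ih =>
    intro k h1 h2 h3
    rw [show c.length + 1 - k = (c.length - k) + 1 by omega, pvStepEq c half k h2 (by omega)]
    by_cases hkp : k = pvPeriodB (c ++ c) c c.length 1
    · rw [hkp, if_pos hp3, pvOuterB, dif_neg (lt_irrefl _)]
    · have hklt : k < pvPeriodB (c ++ c) c c.length 1 := by omega
      have hkn : k < c.length := by omega
      rw [if_neg (hp4 k h2 hklt), pvOuterB, dif_pos hklt]
      have hsplit : pvSplitCombinedHalf (pvRot c k)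
          = pvScanB (pvPrefAux (c ++ c) [0] 0) (PySem.List.pyGetD (pvPrefAux (c ++ c) [0] 0) (k : Int) 0) k c.length (c ++ c) (0 + 1) := by
        have := pvSplit_eq c k hkn c.length 0 (by omega) (by omega)
        simpa [pvSplitCombinedHalf] using this
      rw [← hsplit]
      cases hval : pvSplitCombinedHalf (pvRot c k) with
      | some r => rfl
      | none =>
        have := ih half (k + 1) (by omega) (by omega) hklt
        rwa [show k + 1 - 1 = k by omega, show c.length + 1 - (k + 1) = c.length - k by omega] at this

-- ===== VERDICT (by name: the statement is the Claim_ definition above) =====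
theorem rotate_half_to_left_spec : Claim_equal_rotate_half_to_left := by
  intro half _hdom hpre
  unfold Pre_rotate_half_to_left at hpre
  unfold Spec_rotate_half_to_left
  simp only [rotate_half_to_left, rotate_half_to_left_alt]
  have hnlen : 1 ≤ (half.1 ++ half.2).length := List.length_pos_of_ne_nil hpre
  obtain ⟨hp1, -, -, -⟩ :=
    pvPeriod_spec (half.1 ++ half.2) (half.1 ++ half.2).length 1 (by omega) (le_refl _) hnlen
  have := pvMain (half.1 ++ half.2) half hpre
    (pvPeriodB ((half.1 ++ half.2) ++ (half.1 ++ half.2)) (half.1 ++ half.2) (half.1 ++ half.2).length 1)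
    1 (by omega) (le_refl _) hp1
  simpa [pvRot] using this
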